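-- pv_equiv track=rewrite | github.com/uw-it-aca/myuw | myuw/dao/thrive.py | _make_urls
-- ===== SOURCE A (Python) =====
-- def _make_urls(row):
--     """
--     Supports up to 5 URLS per row as defined in the spec
--     """
--     urls = []
--     for i in range(9, 17, 2):
--         try:
--             if len(row[i]) > 0 and len(row[i+1]) > 0:
--                 urls.append({'title': row[i],
--                              'href': row[i + 1]})
--         except IndexError:
--             return urls
--
--     return urls
-- ===== SOURCE B (Python) =====
-- def _make_urls(row):
--     # Single sequential pass over the whole row with a state machine:
--     # odd positions 9..15 latch a pending title, even positions 10..16 emit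
--     # a dict when both the latched title and the href cell are non-empty.
--     # No indexing, no try/except: cells past the end simply never arrive.
--     urls = []
--     pending = ''
--     for i, cell in enumerate(row):
--         if 9 <= i <= 16:
--             if i % 2 == 1:
--                 pending = cell
--             elif len(pending) > 0 and len(cell) > 0:
--                 urls.append({'title': pending, 'href': cell})
--     return urls
-- ===== Notes on version B (the rewrite author's own statement) =====
-- stated objective: alternative
-- what changed: Replaces the random-access index loop over range(9,17,2) with try/except IndexError by a single sequential pass over the whole row via enumerate with a pending-title state machine: odd positions 9..15 latch a title, even positions 10..16 emit the dict when both cells are non-empty; no indexing or exception handling is needed because cells past the end never arrive.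
import Mathlib
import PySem

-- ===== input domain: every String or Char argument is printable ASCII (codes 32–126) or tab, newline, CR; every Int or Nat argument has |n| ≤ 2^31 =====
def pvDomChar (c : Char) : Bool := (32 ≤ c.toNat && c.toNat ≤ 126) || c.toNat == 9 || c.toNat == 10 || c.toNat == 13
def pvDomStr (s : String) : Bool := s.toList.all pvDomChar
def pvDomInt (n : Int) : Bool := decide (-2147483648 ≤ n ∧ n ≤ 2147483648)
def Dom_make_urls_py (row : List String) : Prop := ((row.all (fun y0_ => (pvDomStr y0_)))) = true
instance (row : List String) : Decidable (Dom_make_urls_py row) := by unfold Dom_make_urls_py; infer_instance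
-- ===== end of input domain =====

-- B replaces A's random-access index loop with try/except IndexError by one sequential
-- pass over the whole row (enumerate) with a pending-title state machine (objective:
-- alternative decomposition, not faster).

-- ===== PORT A =====
-- A-side: the for-loop over i in range(9,17,2) with try/except IndexError; early
-- return when an index is missing, short-circuit 'and' kept (row[i+1] only read
-- when len(row[i]) > 0).
def makeUrlsLoopA (row : List String) : List Int → List (List (String × String)) → List (List (String × String))
  | [], urls => urls
  | i :: rest, urls =>
    match PySem.List.pyGet? row i with
    | none => urls                                   -- IndexError on row[i] → return urls
    | some t =>
      if t.length > 0 then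
        match PySem.List.pyGet? row (i + 1) with
        | none => urls                               -- IndexError on row[i+1] → return urls
        | some h =>
          if h.length > 0 then
            makeUrlsLoopA row rest (urls ++ [[("title", t), ("href", h)]])
          else
            makeUrlsLoopA row rest urls
      else
        makeUrlsLoopA row rest urls                  -- 'and' short-circuits: row[i+1] not read

def make_urls_py (row : List String) : List (List (String × String)) :=
  makeUrlsLoopA row (PySem.List.pyRange 9 17 2) []

-- ===== PORT B =====
-- B-side: one fold over enumerate(row); state = (urls, pending title).
-- 'i % 2 == 1' is Python % on the non-negative index i, ported as PySem.Int.mod.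
def makeUrlsStepB (st : List (List (String × String)) × String) (ic : Int × String) :
    List (List (String × String)) × String :=
  let (urls, pending) := st
  let (i, cell) := ic
  if 9 ≤ i ∧ i ≤ 16 then
    if PySem.Int.mod i 2 == 1 then (urls, cell)
    else if pending.length > 0 ∧ cell.length > 0 then
      (urls ++ [[("title", pending), ("href", cell)]], pending)
    else (urls, pending)
  else (urls, pending)

def make_urls_py_alt (row : List String) : List (List (String × String)) :=
  ((PySem.List.enumerate row).foldl makeUrlsStepB ([], "")).1

-- ===== PRECONDITION & SPEC =====
def Spec_make_urls_py (row : List String) (out : List (List (String × String))) : Prop := out = make_urls_py_alt row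
instance (row : List String) (out : List (List (String × String))) : Decidable (Spec_make_urls_py row out) := by unfold Spec_make_urls_py; infer_instance

-- ===== CLAIM (what is proved, stated in full; the proofs are below) =====
def Claim_equal_make_urls_py : Prop := ∀ (row : List String), Dom_make_urls_py row → Spec_make_urls_py row (make_urls_py row)

-- ===== LEMMAS AND PROOFS =====

-- the list of pair-dicts produced from consecutive pairs of a segment
def pairUp {α : Type} : List α → List (α × α)
  | t :: h :: rest => (t, h) :: pairUp rest
  | _ => []

def bPart (seg : List String) : List (List (String × String)) :=
  ((pairUp seg).filter (fun p => p.1.length > 0 && p.2.length > 0)).map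
    (fun p => [("title", p.1), ("href", p.2)])

theorem pyRange_9_17_2 :
    PySem.List.pyRange 9 17 2 = (List.range 4).map (fun j => ((9 + 2 * j : Nat) : Int)) := by
  decide

-- Loop invariant for A: the loop over indices i, i+2, …, i+2(k-1) computes
-- acc ++ bPart (row[i : i+2k]).
theorem loopA_eq_bPart (row : List String) :
    ∀ (k i : Nat) (acc : List (List (String × String))),
      makeUrlsLoopA row ((List.range k).map (fun j => ((i + 2 * j : Nat) : Int))) acc
        = acc ++ bPart ((row.drop i).take (2 * k)) := by
  intro k
  induction k with
  | zero => intro i acc; simp [makeUrlsLoopA, bPart, pairUp]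
  | succ k ih =>
    intro i acc
    rw [List.range_succ_eq_map]
    simp only [List.map_cons, List.map_map]
    have hmap : (List.range k).map ((fun j => ((i + 2 * j : Nat) : Int)) ∘ Nat.succ)
        = (List.range k).map (fun j => (((i + 2) + 2 * j : Nat) : Int)) := by
      apply List.map_congr_left
      intro j _
      simp only [Function.comp]
      congr 1
      omega
    rw [hmap]
    simp only [Nat.mul_zero, Nat.add_zero]
    have hget0 : PySem.List.pyGet? row ((i : Nat) : Int) = row[i]? :=
      PySem.List.pyGet?_natCast row i
    have hget1 : PySem.List.pyGet? row (((i : Nat) : Int) + 1) = row[i + 1]? := by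
      have hc : (((i : Nat) : Int) + 1) = ((i + 1 : Nat) : Int) := by push_cast; ring
      rw [hc]
      exact PySem.List.pyGet?_natCast row (i + 1)
    have hd0 : row[i]? = (row.drop i).head? := by
      cases h : row.drop i with
      | nil =>
        have : row.length ≤ i := by
          have := congrArg List.length h; simp at this; omega
        simp [List.getElem?_eq_none this]
      | cons t rest1 =>
        have h0 : row[i]? = (row.drop i)[0]? := by simp
        rw [h0, h]; cases rest1 <;> simp
    have hd1 : row[i + 1]? = (row.drop i).tail.head? := by
      cases h : row.drop i with
      | nil =>
        have hlen : row.length ≤ i := by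
          have := congrArg List.length h; simp at this; omega
        simp [List.getElem?_eq_none (by omega : row.length ≤ i + 1)]
      | cons t rest1 =>
        have h1 : row[i + 1]? = (row.drop i)[1]? := by
          rw [List.getElem?_drop]
        rw [h1, h]; cases rest1 <;> simp
    have hd2 : row.drop (i + 2) = (row.drop i).tail.tail := by
      rw [← List.tail_drop, ← List.tail_drop]
    cases hdrop : row.drop i with
    | nil =>
      simp [makeUrlsLoopA, hget0, hd0, hdrop, bPart, pairUp]
    | cons t rest1 =>
      by_cases ht : 0 < t.length
      · cases rest1 with
        | nil =>
          simp [makeUrlsLoopA, hget0, hget1, hd0, hd1, hdrop, ht, bPart, pairUp,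
                Nat.mul_succ]
        | cons h rest2 =>
          by_cases hh : 0 < h.length
          · simp only [makeUrlsLoopA, hget0, hd0, hdrop, List.head?_cons,
                       hget1, hd1, List.tail_cons]
            rw [if_pos ht, if_pos hh, ih (i + 2), hd2, hdrop]
            simp [bPart, pairUp, ht, hh, Nat.mul_succ, List.take_succ_cons]
          · simp only [makeUrlsLoopA, hget0, hd0, hdrop, List.head?_cons,
                       hget1, hd1, List.tail_cons]
            rw [if_pos ht, if_neg hh, ih (i + 2), hd2, hdrop]
            simp [bPart, pairUp, hh, Nat.mul_succ, List.take_succ_cons]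
      · cases rest1 with
        | nil =>
          simp only [makeUrlsLoopA, hget0, hd0, hdrop, List.head?_cons]
          rw [if_neg ht, ih (i + 2), hd2, hdrop]
          simp [bPart, pairUp, Nat.mul_succ]
        | cons h rest2 =>
          simp only [makeUrlsLoopA, hget0, hd0, hdrop, List.head?_cons]
          rw [if_neg ht, ih (i + 2), hd2, hdrop]
          simp [bPart, pairUp, ht, Nat.mul_succ, List.take_succ_cons]

-- What B's fold will still produce from position k onward, given the latched title.
def bPartFrom (k : Nat) (pending : String) (xs : List String) : List (List (String × String)) :=
  if 17 ≤ k then []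
  else if k % 2 = 1 then bPart (xs.take (17 - k))
  else
    match xs with
    | [] => []
    | c :: rest =>
      (if pending.length > 0 && c.length > 0 then [[("title", pending), ("href", c)]] else [])
        ++ bPart (rest.take (16 - k))

-- Invariant for B's fold, for any starting position k ≥ 9.
theorem foldB_from (xs : List String) :
    ∀ (k : Nat) (urls : List (List (String × String))) (pending : String), 9 ≤ k →
      ((PySem.List.enumerate xs (k : Int)).foldl makeUrlsStepB (urls, pending)).1
        = urls ++ bPartFrom k pending xs := by
  induction xs with
  | nil => intro k urls pending hk; simp [PySem.List.enumerate_nil, bPartFrom, bPart, pairUp]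
  | cons c rest ih =>
    intro k urls pending hk
    rw [PySem.List.enumerate_cons]
    simp only [List.foldl_cons]
    have hcast : ((k : Int) + 1) = ((k + 1 : Nat) : Int) := by push_cast; ring
    have hmod : PySem.Int.mod (k : Int) 2 = ((k % 2 : Nat) : Int) :=
      PySem.Int.mod_natCast k 2
    by_cases h17 : 17 ≤ k
    · have hcond : ¬ (9 ≤ (k : Int) ∧ (k : Int) ≤ 16) := by
        intro ⟨_, h⟩; omega
      simp only [makeUrlsStepB, if_neg hcond]
      rw [hcast, ih (k + 1) urls pending (by omega)]
      have h1 : bPartFrom k pending (c :: rest) = [] := by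
        unfold bPartFrom; rw [if_pos h17]
      have h2 : bPartFrom (k + 1) pending rest = [] := by
        unfold bPartFrom; rw [if_pos (by omega)]
      rw [h1, h2]
    · have hcond : 9 ≤ (k : Int) ∧ (k : Int) ≤ 16 := by
        constructor <;> omega
      simp only [makeUrlsStepB, if_pos hcond]
      by_cases hodd : k % 2 = 1
      · -- title position: latch pending := c
        have hmo : (PySem.Int.mod (k : Int) 2 == 1) = true := by
          rw [hmod, hodd]; decide
        simp only [hmo, if_pos]
        rw [hcast, ih (k + 1) urls c (by omega)]
        congr 1
        have hk1 : ¬ (17 ≤ k + 1) ∨ k + 1 = 17 := by omega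
        unfold bPartFrom
        rw [if_neg h17, if_pos hodd]
        by_cases h16 : k + 1 = 17
        · -- k = 16 impossible (k odd ≤ 16 means k ≤ 15); k = 16 even, contradiction
          omega
        · rw [if_neg (by omega : ¬ 17 ≤ k + 1),
              if_neg (by omega : ¬ (k + 1) % 2 = 1)]
          have htk : 17 - k = (16 - k) + 1 := by omega
          rw [htk, List.take_succ_cons]
          cases rest with
          | nil => simp [bPart, pairUp]
          | cons h r2 =>
            have htk2 : 16 - k = (16 - (k + 1)) + 1 := by omega
            rw [htk2, List.take_succ_cons]
            simp only [bPart, pairUp, List.filter_cons]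
            by_cases hch : 0 < c.length ∧ 0 < h.length
            · simp [hch.1, hch.2]
            · have hfa : (decide (0 < c.length) && decide (0 < h.length)) = false := by
                rcases Decidable.not_and_iff_not_or_not.mp hch with hx | hx <;> simp [hx]
              simp [hfa, hch]
      · -- href position: append when both non-empty
        have hmo : (PySem.Int.mod (k : Int) 2 == 1) = false := by
          rw [hmod]
          have : k % 2 = 0 := by omega
          rw [this]; decide
        simp only [hmo, Bool.false_eq_true, if_false]
        have hstep : bPartFrom k pending (c :: rest)
            = (if pending.length > 0 && c.length > 0
                then [[("title", pending), ("href", c)]] else [])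
              ++ bPartFrom (k + 1) pending rest := by
          unfold bPartFrom
          rw [if_neg h17, if_neg hodd]
          by_cases hk16 : k = 16
          · subst hk16
            simp [bPart, pairUp]
          · rw [if_neg (by omega : ¬ 17 ≤ k + 1),
                if_pos (by omega : (k + 1) % 2 = 1)]
            have : 16 - k = 17 - (k + 1) := by omega
            rw [this]
        rw [hstep]
        by_cases hp : pending.length > 0 ∧ c.length > 0
        · rw [if_pos hp, hcast, ih (k + 1) (urls ++ _) pending (by omega)]
          have : (pending.length > 0 && c.length > 0) = true := by
            simp [hp.1, hp.2]
          rw [this]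
          simp
        · rw [if_neg hp, hcast, ih (k + 1) urls pending (by omega)]
          have : (pending.length > 0 && c.length > 0) = false := by
            rcases Decidable.not_and_iff_not_or_not.mp hp with h | h <;> simp at h <;> simp [h]
          rw [this]
          simp

-- B's fold skips positions 0..8: it equals the fold started at 9 on row.drop 9.
theorem foldB_skip (st : List (List (String × String)) × String) :
    ∀ (xs : List String) (k : Nat), k ≤ 9 →
      (PySem.List.enumerate xs (k : Int)).foldl makeUrlsStepB st
        = (PySem.List.enumerate (xs.drop (9 - k)) (9 : Int)).foldl makeUrlsStepB st := by
  intro xs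
  induction xs with
  | nil => intro k hk; simp [PySem.List.enumerate_nil]
  | cons c rest ih =>
    intro k hk
    by_cases h9 : k = 9
    · subst h9; simp
    · rw [PySem.List.enumerate_cons]
      simp only [List.foldl_cons]
      have hcond : ¬ (9 ≤ (k : Int) ∧ (k : Int) ≤ 16) := by
        intro ⟨h, _⟩; omega
      simp only [makeUrlsStepB, if_neg hcond]
      have hcast : ((k : Int) + 1) = ((k + 1 : Nat) : Int) := by push_cast; ring
      rw [hcast, ih (k + 1) (by omega)]
      have : (c :: rest).drop (9 - k) = rest.drop (9 - (k + 1)) := by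
        have h1 : 9 - k = (9 - (k + 1)) + 1 := by omega
        rw [h1, List.drop_succ_cons]
      rw [this]

theorem altB_eq_bPart (row : List String) :
    make_urls_py_alt row = bPart ((row.drop 9).take 8) := by
  unfold make_urls_py_alt
  have h0 : (0 : Int) = ((0 : Nat) : Int) := rfl
  rw [show PySem.List.enumerate row = PySem.List.enumerate row ((0 : Nat) : Int) from rfl,
      foldB_skip ([], "") row 0 (by omega)]
  simp only [Nat.sub_zero]
  rw [show ((9 : Int)) = ((9 : Nat) : Int) from rfl,
      foldB_from (row.drop 9) 9 [] "" (by omega)]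
  simp only [List.nil_append]
  unfold bPartFrom
  rw [if_neg (by omega : ¬ 17 ≤ 9), if_pos (by decide : 9 % 2 = 1)]

-- ===== VERDICT (by name: the statement is the Claim_ definition above) =====
theorem make_urls_py_spec : Claim_equal_make_urls_py := by
  intro row _
  unfold Spec_make_urls_py
  rw [make_urls_py, pyRange_9_17_2, loopA_eq_bPart row 4 9 [], altB_eq_bPart]
  norm_num
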